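-- pv_equiv track=rewrite | github.com/team-telnyx/eva | scripts/run_text_only.py | build_per_role_turns
-- ===== SOURCE A (Python) =====
-- def build_per_role_turns(turns_with_tools: list[dict]) -> tuple[dict[int, str], dict[int, str]]:
--     """Extract per-role turn dicts from grouped transcript. Returns (assistant_turns, user_turns)."""
--     assistant_turns: dict[int, str] = {}
--     user_turns: dict[int, str] = {}
--     asst_idx = 0
--     user_idx = 0
--     for entry in turns_with_tools:
--         role = entry.get("role")
--         if role == "assistant":
--             assistant_turns[asst_idx] = entry.get("content", "")
--             asst_idx += 1
--         elif role == "user":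
--             user_turns[user_idx] = entry.get("content", "")
--             user_idx += 1
--     return assistant_turns, user_turns
-- ===== SOURCE B (Python) =====
-- def build_per_role_turns(turns_with_tools: list[dict]) -> tuple[dict[int, str], dict[int, str]]:
--     """Extract per-role turn dicts from grouped transcript. Returns (assistant_turns, user_turns)."""
--     assistant_turns = {
--         i: e.get("content", "")
--         for i, e in enumerate(e for e in turns_with_tools if e.get("role") == "assistant")
--     }
--     user_turns = {
--         i: e.get("content", "")
--         for i, e in enumerate(e for e in turns_with_tools if e.get("role") == "user")
--     }
--     return assistant_turns, user_turns
-- ===== Notes on version B (the rewrite author's own statement) =====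
-- stated objective: idiomatic
-- what changed: Replaces the single interleaved loop with per-role mutable counters and dict assignments by two independent filtered passes, each a dict comprehension whose sequential integer keys come from enumerate.
import Mathlib
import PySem

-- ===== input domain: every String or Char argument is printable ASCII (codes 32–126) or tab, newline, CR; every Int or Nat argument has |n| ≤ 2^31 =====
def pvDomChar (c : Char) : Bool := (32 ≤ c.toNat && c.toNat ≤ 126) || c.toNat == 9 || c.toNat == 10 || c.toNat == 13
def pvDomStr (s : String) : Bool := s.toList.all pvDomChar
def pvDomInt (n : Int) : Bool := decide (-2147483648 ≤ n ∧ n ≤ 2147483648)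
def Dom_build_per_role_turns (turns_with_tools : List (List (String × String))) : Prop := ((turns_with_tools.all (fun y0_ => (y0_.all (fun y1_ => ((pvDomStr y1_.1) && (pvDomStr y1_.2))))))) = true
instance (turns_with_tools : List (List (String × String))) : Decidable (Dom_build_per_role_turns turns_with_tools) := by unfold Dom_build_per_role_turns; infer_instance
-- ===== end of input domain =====

-- B replaces A's single interleaved loop with per-role counters by two independent
-- filtered enumerate passes (idiomatic; return value proved equal on all inputs).

-- shared helper: Python dict.get on an association list (first match), exact
def pvLookup? : List (String × String) → String → Option String
  | [], _ => none
  | (k, v) :: rest, q => if k = q then some v else pvLookup? rest q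

-- ===== PORT A =====
-- dict assignment d[k] = v on an Int-keyed association list (overwrite first match
-- in place, else append), exact Python dict semantics
def pvSetItem (l : List (Int × String)) (k : Int) (v : String) : List (Int × String) :=
  if l.any (fun p => p.1 = k) then l.map (fun p => if p.1 = k then (k, v) else p)
  else l ++ [(k, v)]

def pvStepA (s : List (Int × String) × List (Int × String) × Int × Int)
    (entry : List (String × String)) : List (Int × String) × List (Int × String) × Int × Int :=
  match s with
  | (a, u, ai, ui) =>
    let role := pvLookup? entry "role"
    if role = some "assistant" then
      (pvSetItem a ai ((pvLookup? entry "content").getD ""), u, ai + 1, ui)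
    else if role = some "user" then
      (a, pvSetItem u ui ((pvLookup? entry "content").getD ""), ai, ui + 1)
    else (a, u, ai, ui)

def build_per_role_turns (turns_with_tools : List (List (String × String))) : (List (Int × String)) × (List (Int × String)) :=
  let st := turns_with_tools.foldl pvStepA ([], [], 0, 0)
  (st.1, st.2.1)

-- ===== PORT B =====
-- enumerate(...) starting at i, exact
def pvEnumFrom (i : Int) : List String → List (Int × String)
  | [] => []
  | x :: xs => (i, x) :: pvEnumFrom (i + 1) xs

def pvRoleContents (role : String) (ts : List (List (String × String))) : List String :=
  (ts.filter (fun e => pvLookup? e "role" = some role)).map (fun e => (pvLookup? e "content").getD "")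

def build_per_role_turns_alt (turns_with_tools : List (List (String × String))) : (List (Int × String)) × (List (Int × String)) :=
  (pvEnumFrom 0 (pvRoleContents "assistant" turns_with_tools),
   pvEnumFrom 0 (pvRoleContents "user" turns_with_tools))

-- ===== PRECONDITION & SPEC =====
def Spec_build_per_role_turns (turns_with_tools : List (List (String × String))) (out : (List (Int × String)) × (List (Int × String))) : Prop := out = build_per_role_turns_alt turns_with_tools
instance (turns_with_tools : List (List (String × String))) (out : (List (Int × String)) × (List (Int × String))) : Decidable (Spec_build_per_role_turns turns_with_tools out) := by unfold Spec_build_per_role_turns; infer_instance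

-- ===== CLAIM (what is proved, stated in full; the proofs are below) =====
def Claim_equal_build_per_role_turns : Prop := ∀ (turns_with_tools : List (List (String × String))), Dom_build_per_role_turns turns_with_tools → Spec_build_per_role_turns turns_with_tools (build_per_role_turns turns_with_tools)

-- ===== LEMMAS AND PROOFS =====

theorem pvSetItem_fresh (l : List (Int × String)) (k : Int) (v : String)
    (h : ∀ p ∈ l, p.1 < k) : pvSetItem l k v = l ++ [(k, v)] := by
  unfold pvSetItem
  rw [if_neg]
  simp only [List.any_eq_true, decide_eq_true_eq, not_exists, not_and]
  intro p hp
  exact ne_of_lt (h p hp)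

theorem pvEnumFrom_append (i : Int) (x : String) (xs : List String) :
    pvEnumFrom i (x :: xs) = (i, x) :: pvEnumFrom (i + 1) xs := rfl

theorem loopA (ts : List (List (String × String))) :
    ∀ (a u : List (Int × String)) (ai ui : Int),
    (∀ p ∈ a, p.1 < ai) → (∀ p ∈ u, p.1 < ui) →
    List.foldl pvStepA (a, u, ai, ui) ts =
      (a ++ pvEnumFrom ai (pvRoleContents "assistant" ts),
       u ++ pvEnumFrom ui (pvRoleContents "user" ts),
       ai + (pvRoleContents "assistant" ts).length,
       ui + (pvRoleContents "user" ts).length) := by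
  induction ts with
  | nil => intro a u ai ui _ _; simp [pvEnumFrom, pvRoleContents]
  | cons e ts ih =>
    intro a u ai ui ha hu
    simp only [List.foldl_cons]
    by_cases hra : pvLookup? e "role" = some "assistant"
    · have hstep : pvStepA (a, u, ai, ui) e =
          (a ++ [(ai, (pvLookup? e "content").getD "")], u, ai + 1, ui) := by
        simp [pvStepA, hra, pvSetItem_fresh a ai _ ha]
      rw [hstep, ih _ _ _ _ (by
            intro p hp
            rcases List.mem_append.mp hp with h1 | h1
            · exact lt_trans (ha p h1) (by omega)
            · rw [List.mem_singleton] at h1; subst h1; simp) hu]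
      have hA : pvRoleContents "assistant" (e :: ts) =
          ((pvLookup? e "content").getD "") :: pvRoleContents "assistant" ts := by
        simp [pvRoleContents, List.filter_cons, hra]
      have hU : pvRoleContents "user" (e :: ts) = pvRoleContents "user" ts := by
        have : ¬ pvLookup? e "role" = some "user" := by rw [hra]; simp
        simp [pvRoleContents, List.filter_cons, this]
      rw [hA, hU, pvEnumFrom_append]
      simp [List.append_assoc]
      omega
    · by_cases hru : pvLookup? e "role" = some "user"
      · have hstep : pvStepA (a, u, ai, ui) e =
            (a, u ++ [(ui, (pvLookup? e "content").getD "")], ai, ui + 1) := by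
          simp [pvStepA, hra, hru, pvSetItem_fresh u ui _ hu]
        rw [hstep, ih _ _ _ _ ha (by
              intro p hp
              rcases List.mem_append.mp hp with h1 | h1
              · exact lt_trans (hu p h1) (by omega)
              · rw [List.mem_singleton] at h1; subst h1; simp)]
        have hA : pvRoleContents "assistant" (e :: ts) = pvRoleContents "assistant" ts := by
          simp [pvRoleContents, List.filter_cons, hra]
        have hU : pvRoleContents "user" (e :: ts) =
            ((pvLookup? e "content").getD "") :: pvRoleContents "user" ts := by
          simp [pvRoleContents, List.filter_cons, hru]
        rw [hA, hU, pvEnumFrom_append]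
        simp [List.append_assoc]
        omega
      · have hstep : pvStepA (a, u, ai, ui) e = (a, u, ai, ui) := by
          simp [pvStepA, hra, hru]
        rw [hstep, ih _ _ _ _ ha hu]
        have hA : pvRoleContents "assistant" (e :: ts) = pvRoleContents "assistant" ts := by
          simp [pvRoleContents, List.filter_cons, hra]
        have hU : pvRoleContents "user" (e :: ts) = pvRoleContents "user" ts := by
          simp [pvRoleContents, List.filter_cons, hru]
        rw [hA, hU]

-- ===== VERDICT (by name: the statement is the Claim_ definition above) =====
theorem build_per_role_turns_spec : Claim_equal_build_per_role_turns := by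
  intro ts _
  unfold Spec_build_per_role_turns build_per_role_turns build_per_role_turns_alt
  rw [loopA ts [] [] 0 0 (by simp) (by simp)]
  simp
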